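-- pv_equiv track=rewrite | github.com/azamvosejonov/Ai_oqituvchi | scripts/live_api_smoke.py | substitute_path_params
-- ===== SOURCE A (Python) =====
-- def substitute_path_params(path: str) -> str:
--     # Replace any {param} with '1'
--     out = ""
--     i = 0
--     while i < len(path):
--         if path[i] == "{" :
--             while i < len(path) and path[i] != "}":
--                 i += 1
--             out += "1"
--         else:
--             out += path[i]
--         i += 1
--     return out
-- ===== SOURCE B (Python) =====
-- def substitute_path_params(path: str) -> str:
--     # Segment-based: partition off text before each '{', emit '1', skip to past the next '}'.
--     pieces = []
--     rest = path
--     while True: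
--         head, brace, rest = rest.partition('{')
--         pieces.append(head)
--         if not brace:
--             return ''.join(pieces)
--         pieces.append('1')
--         _, _, rest = rest.partition('}')
-- ===== Notes on version B (the rewrite author's own statement) =====
-- stated objective: faster
-- what changed: Replaces A's index-driven character-by-character state machine (with quadratic string += accumulation) by a segment loop using str.partition plus a final join: split off the text before each placeholder, emit '1', skip past its closing brace.
import Mathlib
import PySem

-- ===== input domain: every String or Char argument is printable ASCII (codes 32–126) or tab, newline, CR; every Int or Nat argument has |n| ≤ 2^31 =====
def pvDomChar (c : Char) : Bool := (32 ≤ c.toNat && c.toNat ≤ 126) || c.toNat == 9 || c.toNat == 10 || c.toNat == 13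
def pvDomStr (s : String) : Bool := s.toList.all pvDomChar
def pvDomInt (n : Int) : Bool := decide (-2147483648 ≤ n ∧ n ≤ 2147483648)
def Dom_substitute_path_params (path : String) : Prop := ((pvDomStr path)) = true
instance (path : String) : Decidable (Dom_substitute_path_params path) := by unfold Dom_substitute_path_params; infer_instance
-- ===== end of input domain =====

-- B replaces A's per-character state machine (quadratic string += accumulation) by a
-- partition-based segment loop with a final join; measured faster in a timing run.

-- ===== PORT A =====
-- A: index scan; on '{' the inner while advances to the next '}' (or end), then emits '1'.
-- The inner index loop is rendered as dropWhile (char-by-char scan) followed by drop 1 (the i += 1).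
def pvA_loop (acc : List Char) : List Char → List Char
  | [] => acc
  | c :: rest =>
    if c = '{' then pvA_loop (acc ++ ['1']) ((rest.dropWhile (· ≠ '}')).drop 1)
    else pvA_loop (acc ++ [c]) rest
termination_by cs => cs.length
decreasing_by
  · have h1 := List.length_dropWhile_le (p := fun x => !decide (x = '}')) (l := rest)
    simp only [decide_not, List.length_drop, List.length_cons] at *
    omega
  · simp

def substitute_path_params (path : String) : String :=
  String.ofList (pvA_loop [] path.toList)

-- ===== PORT B =====
-- B: rest.partition('{') = (takeWhile, match on dropWhile); on a hit emit '1' and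
-- continue past the next '}' (the second partition); ''.join(pieces) is the concatenation.
def pvB_loop (cs : List Char) : List Char :=
  if h : cs.dropWhile (· ≠ '{') = [] then cs.takeWhile (· ≠ '{')
  else cs.takeWhile (· ≠ '{') ++
    '1' :: pvB_loop ((((cs.dropWhile (· ≠ '{')).tail).dropWhile (· ≠ '}')).drop 1)
termination_by cs.length
decreasing_by
  simp only [decide_not] at h ⊢
  have h1 := List.length_dropWhile_le (p := fun x => !decide (x = '{')) (l := cs)
  have h2 := List.length_dropWhile_le (p := fun x => !decide (x = '}'))
      (l := (cs.dropWhile (fun x => !decide (x = '{'))).tail)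
  have h3 : (cs.dropWhile (fun x => !decide (x = '{'))).length ≠ 0 := by
    simpa [List.length_eq_zero_iff] using h
  simp only [List.length_drop, List.length_tail] at h2 ⊢
  omega

def substitute_path_params_alt (path : String) : String :=
  String.ofList (pvB_loop path.toList)

-- ===== PRECONDITION & SPEC =====
def Spec_substitute_path_params (path : String) (out : String) : Prop := out = substitute_path_params_alt path
instance (path : String) (out : String) : Decidable (Spec_substitute_path_params path out) := by unfold Spec_substitute_path_params; infer_instance

-- ===== CLAIM (what is proved, stated in full; the proofs are below) =====
def Claim_equal_substitute_path_params : Prop := ∀ (path : String), Dom_substitute_path_params path → Spec_substitute_path_params path (substitute_path_params path)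

-- ===== LEMMAS AND PROOFS =====

-- B keeps a non-'{' head character and recurses on the tail.
theorem pvB_loop_cons_ne (c : Char) (rest : List Char) (hc : c ≠ '{') :
    pvB_loop (c :: rest) = c :: pvB_loop rest := by
  conv_lhs => rw [pvB_loop.eq_def]
  conv_rhs => rw [pvB_loop.eq_def]
  simp [hc]
  split_ifs <;> simp

theorem pvB_loop_cons_brace (rest : List Char) :
    pvB_loop ('{' :: rest) = '1' :: pvB_loop ((rest.dropWhile (· ≠ '}')).drop 1) := by
  rw [pvB_loop.eq_def]
  simp

-- A's accumulator loop equals acc ++ B's segment loop.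
theorem pvA_eq_pvB_aux : ∀ (n : Nat) (cs : List Char), cs.length ≤ n →
    ∀ acc, pvA_loop acc cs = acc ++ pvB_loop cs := by
  intro n
  induction n with
  | zero =>
    intro cs hcs acc
    have : cs = [] := List.length_eq_zero_iff.mp (Nat.le_zero.mp hcs)
    subst this
    rw [pvA_loop, pvB_loop.eq_def]
    simp
  | succ n ih =>
    intro cs hcs acc
    match cs with
    | [] => rw [pvA_loop, pvB_loop]; simp
    | c :: rest =>
      by_cases hc : c = '{'
      · subst hc
        rw [pvA_loop, pvB_loop_cons_brace]
        rw [ih _ (by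
          have h2 := List.length_dropWhile_le (p := fun x => !decide (x = '}')) (l := rest)
          simp only [List.length_cons, Nat.succ_le_succ_iff] at hcs
          simp only [List.length_drop]
          simp only [decide_not] at *
          omega)]
        simp
      · rw [pvA_loop, pvB_loop_cons_ne c rest hc]
        simp only [if_neg hc]
        rw [ih rest (by simp at hcs; omega)]
        simp

theorem pvA_eq_pvB (cs : List Char) (acc : List Char) :
    pvA_loop acc cs = acc ++ pvB_loop cs :=
  pvA_eq_pvB_aux cs.length cs le_rfl acc

-- ===== VERDICT (by name: the statement is the Claim_ definition above) =====
theorem substitute_path_params_spec : Claim_equal_substitute_path_params := by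
  intro path _
  unfold Spec_substitute_path_params substitute_path_params substitute_path_params_alt
  rw [pvA_eq_pvB]
  simp
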